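-- pv_equiv track=rewrite | github.com/pahanini/aoc | 2024/14.py | pzl2
-- ===== SOURCE A (Python) =====
-- from math import prod
--
-- def pzl1(robots, w=101, h=103, steps=100):
--     q = [0] * 4
--     for px, py, vx, vy in robots:
--         px = (px + vx * steps) % w
--         py = (py + vy * steps) % h
--         hw = (w - 1) // 2
--         hh = (h - 1) // 2
--         if px != hw and py != hh:
--             q[(px > hw) + 2 * (py > hh)] += 1
--     return prod(q)
--
-- def pzl2(robots, w=101, h=103):
--     min_sf = float("inf")
--     best = None
--     q = [0] * 4
--     for second in range(h*w):
--         sf = pzl1(robots, w, h, steps=second)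
--         if sf < min_sf:
--             min_sf = sf
--             best = second
--     return best
-- ===== SOURCE B (Python) =====
-- from math import gcd
--
-- def pzl2(robots, w=101, h=103):
--     n = w * h
--     if n <= 0:
--         return None
--     # the safety factor is periodic in the second with period lcm(|w|, |h|),
--     # which divides n, so the first minimum occurs within the first lcm seconds
--     W, H = abs(w), abs(h)
--     L = W * H // gcd(W, H)
--     hw = (w - 1) // 2
--     hh = (h - 1) // 2
--     pts = [(px % w, py % h) for px, py, vx, vy in robots]
--     vels = [(vx, vy) for px, py, vx, vy in robots]
--     sfs = []
--     for _ in range(L):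
--         a = b = c = d = 0
--         for x, y in pts:
--             if x < hw:
--                 if y < hh:
--                     a += 1
--                 elif y > hh:
--                     c += 1
--             elif x > hw:
--                 if y < hh:
--                     b += 1
--                 elif y > hh:
--                     d += 1
--         sfs.append(a * b * c * d)
--         pts = [((x + vx) % w, (y + vy) % h) for (x, y), (vx, vy) in zip(pts, vels)]
--     return sfs.index(min(sfs))
-- ===== Notes on version B (the rewrite author's own statement) =====
-- stated objective: faster
-- what changed: B normalizes positions once and advances every robot by one residue step per second instead of recomputing (p+v*t)%m from scratch each second, scans only the first lcm(|w|,|h|) seconds (the safety factor is periodic with that period, which divides w*h), tallies quadrants in one nested-if pass, collects the safety factors into a list and returns sfs.index(min(sfs)) instead of a running strict-< argmin; intended as faster (asymptotic when gcd(w,h)>1): a timing run measured B 1.4-2.5x at the largest size both finished and 4-9x where A began timing out, recorded as faster:unconfirmed.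
import Mathlib
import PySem

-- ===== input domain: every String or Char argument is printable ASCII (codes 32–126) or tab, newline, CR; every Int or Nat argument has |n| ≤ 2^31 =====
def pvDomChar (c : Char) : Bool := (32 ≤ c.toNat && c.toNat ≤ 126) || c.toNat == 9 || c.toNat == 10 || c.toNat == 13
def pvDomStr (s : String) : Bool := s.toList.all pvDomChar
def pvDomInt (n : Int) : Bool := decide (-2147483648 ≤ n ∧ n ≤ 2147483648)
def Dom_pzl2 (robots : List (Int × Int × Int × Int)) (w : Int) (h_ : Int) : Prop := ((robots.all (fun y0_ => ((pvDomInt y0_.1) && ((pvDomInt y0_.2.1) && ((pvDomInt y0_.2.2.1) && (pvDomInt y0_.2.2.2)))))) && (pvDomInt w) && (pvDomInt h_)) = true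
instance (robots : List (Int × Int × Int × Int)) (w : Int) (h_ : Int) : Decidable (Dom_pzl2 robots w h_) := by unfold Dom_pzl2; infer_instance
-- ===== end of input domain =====

-- B replaces A's per-second recomputation of all positions (pzl1 with steps=t) and its running
-- strict-< argmin by: normalize positions once, advance each robot one step per second, scan only
-- the first lcm(|w|,|h|) seconds (the safety factor is periodic with that period, which divides
-- w*h), collect the safety factors in a list and return sfs.index(min(sfs)).

-- ===== PORT A =====
-- pzl1(robots, w, h, steps): the list q of 4 counters is ported as a 4-tuple; q[i] += 1 becomes
-- a case split on the index i ∈ {0,1,2,3}; prod(q) is the product of the components.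

def pzl1A (robots : List (Int × Int × Int × Int)) (w : Int) (h_ : Int) (steps : Int) : Int :=
  let q := robots.foldl (fun (q : Int × Int × Int × Int) r =>
    let px := PySem.Int.mod (r.1 + r.2.2.1 * steps) w
    let py := PySem.Int.mod (r.2.1 + r.2.2.2 * steps) h_
    let hw := PySem.Int.floordiv (w - 1) 2
    let hh := PySem.Int.floordiv (h_ - 1) 2
    if px ≠ hw ∧ py ≠ hh then
      let i : Int := (if px > hw then 1 else 0) + 2 * (if py > hh then 1 else 0)
      if i = 0 then (q.1 + 1, q.2.1, q.2.2.1, q.2.2.2)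
      else if i = 1 then (q.1, q.2.1 + 1, q.2.2.1, q.2.2.2)
      else if i = 2 then (q.1, q.2.1, q.2.2.1 + 1, q.2.2.2)
      else (q.1, q.2.1, q.2.2.1, q.2.2.2 + 1)
    else q) (0, 0, 0, 0)
  q.1 * q.2.1 * q.2.2.1 * q.2.2.2

-- the loop body of pzl2; min_sf = float("inf") / best = None: the pair (min_sf, best) is ported
-- as (Option Int × Option Int), none = inf (every int compares < inf, as on the first iteration).

def bodyA (robots : List (Int × Int × Int × Int)) (w : Int) (h_ : Int)
    (st : Option Int × Option Int) (second : Int) : Option Int × Option Int :=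
  let sf := pzl1A robots w h_ second
  match st.1 with
  | none => (some sf, some second)
  | some m => if sf < m then (some sf, some second) else st

def pzl2 (robots : List (Int × Int × Int × Int)) (w : Int) (h_ : Int) : Option Int :=
  ((PySem.List.pyRange 0 (h_ * w) 1).foldl (bodyA robots w h_) (none, none)).2

-- ===== PORT B =====
-- one iteration of B's loop: score the current positions (sum(1 for … if cond) = countP),
-- append the safety factor, advance every robot by one step.

def stepB (w : Int) (h_ : Int) (hw : Int) (hh : Int) (vels : List (Int × Int))
    (st : List (Int × Int) × List Int) : List (Int × Int) × List Int :=
  let t := st.1.foldl (fun (t : Int × Int × Int × Int) p =>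
    if p.1 < hw then
      if p.2 < hh then (t.1 + 1, t.2.1, t.2.2.1, t.2.2.2)
      else if p.2 > hh then (t.1, t.2.1, t.2.2.1 + 1, t.2.2.2)
      else t
    else if p.1 > hw then
      if p.2 < hh then (t.1, t.2.1 + 1, t.2.2.1, t.2.2.2)
      else if p.2 > hh then (t.1, t.2.1, t.2.2.1, t.2.2.2 + 1)
      else t
    else t) (0, 0, 0, 0)
  let pts' := (st.1.zip vels).map
    (fun pv => (PySem.Int.mod (pv.1.1 + pv.2.1) w, PySem.Int.mod (pv.1.2 + pv.2.2) h_))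
  (pts', st.2 ++ [t.1 * t.2.1 * t.2.2.1 * t.2.2.2])

-- sfs.index(min(sfs)) is index? of min?.
def pzl2_alt (robots : List (Int × Int × Int × Int)) (w : Int) (h_ : Int) : Option Int :=
  let n := w * h_
  if n ≤ 0 then none
  else
    let W : Int := |w|
    let H : Int := |h_|
    let L : Int := PySem.Int.floordiv (W * H) ((Int.gcd W H : Nat) : Int)
    let hw := PySem.Int.floordiv (w - 1) 2
    let hh := PySem.Int.floordiv (h_ - 1) 2
    let pts0 := robots.map (fun r => (PySem.Int.mod r.1 w, PySem.Int.mod r.2.1 h_))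
    let vels := robots.map (fun r => (r.2.2.1, r.2.2.2))
    let res := (PySem.List.pyRange 0 L 1).foldl
      (fun st _ => stepB w h_ hw hh vels st) (pts0, ([] : List Int))
    match PySem.List.min? res.2 (fun x => x) with
    | none => none
    | some m => (PySem.List.index? res.2 m).map (fun k => (k : Int))

-- ===== PRECONDITION & SPEC =====
def Spec_pzl2 (robots : List (Int × Int × Int × Int)) (w : Int) (h_ : Int) (out : Option Int) : Prop := out = pzl2_alt robots w h_
instance (robots : List (Int × Int × Int × Int)) (w : Int) (h_ : Int) (out : Option Int) : Decidable (Spec_pzl2 robots w h_ out) := by unfold Spec_pzl2; infer_instance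

-- ===== CLAIM (what is proved, stated in full; the proofs are below) =====
def Claim_equal_pzl2 : Prop := ∀ (robots : List (Int × Int × Int × Int)) (w : Int) (h_ : Int), Dom_pzl2 robots w h_ → Spec_pzl2 robots w h_ (pzl2 robots w h_)

-- ===== LEMMAS AND PROOFS =====

-- Python % is Int.fmod; adding a multiple of the modulus before reducing changes nothing,
-- so reducing a position every second agrees with A's one-shot reduction.

theorem pymod_mod_add (a c b : Int) :
    PySem.Int.mod (PySem.Int.mod a b + c) b = PySem.Int.mod (a + c) b := by
  show ((a.fmod b) + c).fmod b = (a + c).fmod b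
  have h : a.fmod b + c = (a + c) + b * (-(a.fdiv b)) := by rw [Int.fmod_def]; ring
  rw [h, Int.add_mul_fmod_self_left]

-- position of one robot after s seconds, as A computes it
def posAt (w : Int) (h_ : Int) (s : Int) (r : Int × Int × Int × Int) : Int × Int :=
  (PySem.Int.mod (r.1 + r.2.2.1 * s) w, PySem.Int.mod (r.2.1 + r.2.2.2 * s) h_)

def ptsAt (robots : List (Int × Int × Int × Int)) (w : Int) (h_ : Int) (s : Int) :
    List (Int × Int) := robots.map (posAt w h_ s)

-- A's bucket fold over the robots computes the four quadrant counts
theorem bump_countR (w h_ s : Int) (l : List (Int × Int × Int × Int)) :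
    ∀ q : Int × Int × Int × Int,
    l.foldl (fun (q : Int × Int × Int × Int) r =>
      let px := PySem.Int.mod (r.1 + r.2.2.1 * s) w
      let py := PySem.Int.mod (r.2.1 + r.2.2.2 * s) h_
      let hw := PySem.Int.floordiv (w - 1) 2
      let hh := PySem.Int.floordiv (h_ - 1) 2
      if px ≠ hw ∧ py ≠ hh then
        let i : Int := (if px > hw then 1 else 0) + 2 * (if py > hh then 1 else 0)
        if i = 0 then (q.1 + 1, q.2.1, q.2.2.1, q.2.2.2)
        else if i = 1 then (q.1, q.2.1 + 1, q.2.2.1, q.2.2.2)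
        else if i = 2 then (q.1, q.2.1, q.2.2.1 + 1, q.2.2.2)
        else (q.1, q.2.1, q.2.2.1, q.2.2.2 + 1)
      else q) q
    = (q.1 + (l.countP (fun r => decide ((posAt w h_ s r).1 < PySem.Int.floordiv (w - 1) 2) && decide ((posAt w h_ s r).2 < PySem.Int.floordiv (h_ - 1) 2)) : Int),
       q.2.1 + (l.countP (fun r => decide ((posAt w h_ s r).1 > PySem.Int.floordiv (w - 1) 2) && decide ((posAt w h_ s r).2 < PySem.Int.floordiv (h_ - 1) 2)) : Int),
       q.2.2.1 + (l.countP (fun r => decide ((posAt w h_ s r).1 < PySem.Int.floordiv (w - 1) 2) && decide ((posAt w h_ s r).2 > PySem.Int.floordiv (h_ - 1) 2)) : Int),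
       q.2.2.2 + (l.countP (fun r => decide ((posAt w h_ s r).1 > PySem.Int.floordiv (w - 1) 2) && decide ((posAt w h_ s r).2 > PySem.Int.floordiv (h_ - 1) 2)) : Int)) := by
  induction l with
  | nil => intro q; simp
  | cons p t ih =>
    intro q
    simp only [List.foldl_cons, List.countP_cons]
    rw [ih]
    simp only [posAt, gt_iff_lt]
    generalize PySem.Int.floordiv (w - 1) 2 = A
    generalize PySem.Int.floordiv (h_ - 1) 2 = B
    by_cases hx1 : PySem.Int.mod (p.1 + p.2.2.1 * s) w = A
    · simp [hx1]
    · by_cases hy1 : PySem.Int.mod (p.2.1 + p.2.2.2 * s) h_ = B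
      · simp [hy1]
      · rw [if_pos (And.intro hx1 hy1)]
        rcases lt_or_gt_of_ne hx1 with hx | hx <;>
          rcases lt_or_gt_of_ne hy1 with hy | hy <;>
          (simp [hx, hy, asymm hx, asymm hy, Prod.ext_iff]; try omega)

-- B's quadrant cross-tabulation
def scoreQ (hw : Int) (hh : Int) (pts : List (Int × Int)) : Int :=
  ((pts.countP (fun p => decide (p.1 < hw) && decide (p.2 < hh)) : Int)) *
  ((pts.countP (fun p => decide (p.1 > hw) && decide (p.2 < hh)) : Int)) *
  ((pts.countP (fun p => decide (p.1 < hw) && decide (p.2 > hh)) : Int)) *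
  ((pts.countP (fun p => decide (p.1 > hw) && decide (p.2 > hh)) : Int))

-- pzl1 at second s equals B's cross-tabulation of the positions at second s
theorem pzl1A_eq_scoreQ (robots : List (Int × Int × Int × Int)) (w h_ s : Int) :
    pzl1A robots w h_ s
      = scoreQ (PySem.Int.floordiv (w - 1) 2) (PySem.Int.floordiv (h_ - 1) 2)
          (ptsAt robots w h_ s) := by
  unfold pzl1A scoreQ ptsAt
  rw [bump_countR]
  simp [List.countP_map, Function.comp_def]

-- B's single-pass tally over the positions computes the four quadrant counts
theorem tally_count (hw hh : Int) (l : List (Int × Int)) :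
    ∀ t : Int × Int × Int × Int,
    l.foldl (fun (t : Int × Int × Int × Int) p =>
      if p.1 < hw then
        if p.2 < hh then (t.1 + 1, t.2.1, t.2.2.1, t.2.2.2)
        else if p.2 > hh then (t.1, t.2.1, t.2.2.1 + 1, t.2.2.2)
        else t
      else if p.1 > hw then
        if p.2 < hh then (t.1, t.2.1 + 1, t.2.2.1, t.2.2.2)
        else if p.2 > hh then (t.1, t.2.1, t.2.2.1, t.2.2.2 + 1)
        else t
      else t) t
    = (t.1 + (l.countP (fun p => decide (p.1 < hw) && decide (p.2 < hh)) : Int),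
       t.2.1 + (l.countP (fun p => decide (p.1 > hw) && decide (p.2 < hh)) : Int),
       t.2.2.1 + (l.countP (fun p => decide (p.1 < hw) && decide (p.2 > hh)) : Int),
       t.2.2.2 + (l.countP (fun p => decide (p.1 > hw) && decide (p.2 > hh)) : Int)) := by
  induction l with
  | nil => intro t; simp
  | cons p l ih =>
    intro t
    simp only [List.foldl_cons, List.countP_cons]
    rw [ih]
    rcases lt_trichotomy p.1 hw with hx | hx | hx
    · rcases lt_trichotomy p.2 hh with hy | hy | hy
      · (simp [hx, hy, asymm hx, asymm hy, Prod.ext_iff]; try omega)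
      · (simp [hx, hy, asymm hx, Prod.ext_iff]; try omega)
      · (simp [hx, hy, asymm hx, asymm hy, Prod.ext_iff]; try omega)
    · rcases lt_trichotomy p.2 hh with hy | hy | hy
      · (simp [hx, hy, asymm hy, Prod.ext_iff]; try omega)
      · (simp [hx, hy, Prod.ext_iff]; try omega)
      · (simp [hx, hy, asymm hy, Prod.ext_iff]; try omega)
    · rcases lt_trichotomy p.2 hh with hy | hy | hy
      · (simp [hx, hy, asymm hx, asymm hy, Prod.ext_iff]; try omega)
      · (simp [hx, hy, asymm hx, Prod.ext_iff]; try omega)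
      · (simp [hx, hy, asymm hx, asymm hy, Prod.ext_iff]; try omega)

theorem stepB_eq (w h_ hw hh : Int) (vels : List (Int × Int))
    (pts : List (Int × Int)) (sfs : List Int) :
    stepB w h_ hw hh vels (pts, sfs)
      = ((pts.zip vels).map
          (fun pv => (PySem.Int.mod (pv.1.1 + pv.2.1) w, PySem.Int.mod (pv.1.2 + pv.2.2) h_)),
         sfs ++ [scoreQ hw hh pts]) := by
  unfold stepB scoreQ
  rw [tally_count]
  simp

-- invariant of B's loop: current positions and the safety factors collected so far
theorem Bfold_inv (robots : List (Int × Int × Int × Int)) (w h_ : Int) (N : Nat) :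
    (PySem.List.pyRange 0 (N : Int) 1).foldl
      (fun st _ => stepB w h_ (PySem.Int.floordiv (w - 1) 2) (PySem.Int.floordiv (h_ - 1) 2)
        (robots.map (fun r => (r.2.2.1, r.2.2.2))) st)
      (robots.map (fun r => (PySem.Int.mod r.1 w, PySem.Int.mod r.2.1 h_)), ([] : List Int))
    = (ptsAt robots w h_ (N : Int),
       (List.range N).map (fun (k : Nat) => pzl1A robots w h_ (k : Int))) := by
  induction N with
  | zero =>
    rw [show ((0:Nat):Int) = 0 from rfl, PySem.List.pyRange_one_eq_nil (le_refl (0:Int))]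
    simp [ptsAt, posAt]
  | succ n ih =>
    have hc : ((n+1 : Nat) : Int) = (n : Int) + 1 := by push_cast; ring
    rw [hc, PySem.List.pyRange_one_succ_right (Int.natCast_nonneg n), List.foldl_append, ih]
    simp only [List.foldl_cons, List.foldl_nil]
    rw [stepB_eq]
    refine Prod.ext ?_ ?_
    · show ((ptsAt robots w h_ (n:Int)).zip (robots.map fun r => (r.2.2.1, r.2.2.2))).map
          (fun pv => (PySem.Int.mod (pv.1.1 + pv.2.1) w, PySem.Int.mod (pv.1.2 + pv.2.2) h_))
        = ptsAt robots w h_ ((n:Int)+1)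
      unfold ptsAt
      rw [List.zip_map', List.map_map]
      refine List.map_congr_left ?_
      intro r _
      simp only [Function.comp_apply, posAt]
      refine Prod.ext ?_ ?_ <;> (show PySem.Int.mod _ _ = PySem.Int.mod _ _; rw [pymod_mod_add]; congr 1; ring)
    · show _ ++ [scoreQ _ _ _]
        = (List.range (n+1)).map (fun (k : Nat) => pzl1A robots w h_ (k : Int))
      rw [List.range_succ, List.map_append, List.map_cons, List.map_nil]
      congr 1
      rw [pzl1A_eq_scoreQ]

-- characterization of A's strict-< loop: value and index of the first minimum
theorem Afold_char (robots : List (Int × Int × Int × Int)) (w h_ : Int) (N : Nat) (hN : 0 < N) :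
    ∃ m b : Int,
      (PySem.List.pyRange 0 (N : Int) 1).foldl (bodyA robots w h_) (none, none)
        = (some m, some b)
      ∧ 0 ≤ b ∧ b < (N : Int) ∧ pzl1A robots w h_ b = m
      ∧ (∀ j : Int, 0 ≤ j → j < (N : Int) → m ≤ pzl1A robots w h_ j)
      ∧ (∀ j : Int, 0 ≤ j → j < b → m < pzl1A robots w h_ j) := by
  induction N with
  | zero => omega
  | succ n ih =>
    rcases Nat.eq_zero_or_pos n with h0 | hpos
    · subst h0
      refine ⟨pzl1A robots w h_ 0, 0, ?_, le_refl 0, by norm_num, rfl, ?_, ?_⟩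
      · rw [show ((0+1:Nat):Int) = 0 + 1 from by norm_num,
            PySem.List.pyRange_one_succ_right (le_refl (0:Int)),
            PySem.List.pyRange_one_eq_nil (le_refl (0:Int))]
        simp [bodyA]
      · intro j hj1 hj2
        have : j = 0 := by push_cast at hj2; omega
        subst this; exact le_refl _
      · intro j hj1 hj2; omega
    · obtain ⟨m, b, hfold, hb0, hbN, hfb, hmin, hstrict⟩ := ih hpos
      have hc : ((n+1 : Nat) : Int) = (n : Int) + 1 := by push_cast; ring
      rw [hc, PySem.List.pyRange_one_succ_right (Int.natCast_nonneg n), List.foldl_append,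
          hfold]
      simp only [List.foldl_cons, List.foldl_nil]
      by_cases hlt : pzl1A robots w h_ (n : Int) < m
      · refine ⟨pzl1A robots w h_ (n : Int), (n : Int), ?_, Int.natCast_nonneg n,
          by linarith, rfl, ?_, ?_⟩
        · simp [bodyA, hlt]
        · intro j hj0 hjN
          by_cases hjn : j < (n : Int)
          · exact le_of_lt (lt_of_lt_of_le hlt (hmin j hj0 hjn))
          · have : j = (n : Int) := by omega
            subst this; exact le_refl _
        · intro j hj0 hjb
          exact lt_of_lt_of_le hlt (hmin j hj0 hjb)
      · refine ⟨m, b, ?_, hb0, by linarith, hfb, ?_, hstrict⟩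
        · simp [bodyA, hlt]
        · intro j hj0 hjN
          by_cases hjn : j < (n : Int)
          · exact hmin j hj0 hjn
          · have : j = (n : Int) := by omega
            subst this; exact not_lt.1 hlt

-- adding a multiple of the modulus changes nothing
theorem pymod_add_dvd (a b x : Int) (h : b ∣ x) :
    PySem.Int.mod (a + x) b = PySem.Int.mod a b := by
  obtain ⟨k, hk⟩ := h
  subst hk
  exact Int.add_mul_fmod_self_left a b k

-- the safety factor is periodic in the second with period lcm(|w|, |h|)
theorem pzl1A_period (robots : List (Int × Int × Int × Int)) (w h_ s : Int) :
    pzl1A robots w h_ (s + ((Nat.lcm w.natAbs h_.natAbs : Nat) : Int)) = pzl1A robots w h_ s := by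
  have hdw : w ∣ ((Nat.lcm w.natAbs h_.natAbs : Nat) : Int) :=
    dvd_trans (Int.dvd_natAbs.mpr dvd_rfl) (Int.natCast_dvd_natCast.mpr (Nat.dvd_lcm_left _ _))
  have hdh : h_ ∣ ((Nat.lcm w.natAbs h_.natAbs : Nat) : Int) :=
    dvd_trans (Int.dvd_natAbs.mpr dvd_rfl) (Int.natCast_dvd_natCast.mpr (Nat.dvd_lcm_right _ _))
  rw [pzl1A_eq_scoreQ, pzl1A_eq_scoreQ]
  congr 1
  unfold ptsAt
  refine List.map_congr_left ?_
  intro r _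
  unfold posAt
  refine Prod.ext ?_ ?_
  · show PySem.Int.mod _ _ = PySem.Int.mod _ _
    rw [show r.1 + r.2.2.1 * (s + ((Nat.lcm w.natAbs h_.natAbs : Nat) : Int))
          = (r.1 + r.2.2.1 * s) + r.2.2.1 * ((Nat.lcm w.natAbs h_.natAbs : Nat) : Int) from by ring]
    exact pymod_add_dvd _ _ _ (hdw.mul_left r.2.2.1)
  · show PySem.Int.mod _ _ = PySem.Int.mod _ _
    rw [show r.2.1 + r.2.2.2 * (s + ((Nat.lcm w.natAbs h_.natAbs : Nat) : Int))
          = (r.2.1 + r.2.2.2 * s) + r.2.2.2 * ((Nat.lcm w.natAbs h_.natAbs : Nat) : Int) from by ring]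
    exact pymod_add_dvd _ _ _ (hdh.mul_left r.2.2.2)

theorem pzl1A_mod_period (robots : List (Int × Int × Int × Int)) (w h_ : Int) (t : Nat)
    (hL : 0 < Nat.lcm w.natAbs h_.natAbs) :
    pzl1A robots w h_ (t : Int)
      = pzl1A robots w h_ ((t % Nat.lcm w.natAbs h_.natAbs : Nat) : Int) := by
  induction t using Nat.strong_induction_on with
  | _ t ih =>
    by_cases h : t < Nat.lcm w.natAbs h_.natAbs
    · rw [Nat.mod_eq_of_lt h]
    · rw [not_lt] at h
      have hcast : ((t : Nat) : Int)
          = ((t - Nat.lcm w.natAbs h_.natAbs : Nat) : Int) + ((Nat.lcm w.natAbs h_.natAbs : Nat) : Int) := by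
        push_cast [h]
        omega
      rw [hcast, pzl1A_period, ih _ (by omega), ← Nat.mod_eq_sub_mod h]

-- the two programs agree on every input
theorem pzl2_eq (robots : List (Int × Int × Int × Int)) (w h_ : Int) :
    pzl2 robots w h_ = pzl2_alt robots w h_ := by
  by_cases hn : w * h_ ≤ 0
  · simp only [pzl2, pzl2_alt, if_pos hn]
    rw [PySem.List.pyRange_one_eq_nil (show h_ * w ≤ 0 by rw [Int.mul_comm]; exact hn)]
    rfl
  · rw [not_le] at hn
    obtain ⟨N, hNeq⟩ : ∃ N : Nat, (N : Int) = w * h_ :=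
      ⟨(w * h_).toNat, Int.toNat_of_nonneg hn.le⟩
    have hNpos : 0 < N := by omega
    have hw0 : w ≠ 0 := by rintro rfl; simp at hn
    have hh0 : h_ ≠ 0 := by rintro rfl; simp at hn
    have hLpos : 0 < Nat.lcm w.natAbs h_.natAbs :=
      Nat.lcm_pos (Int.natAbs_pos.mpr hw0) (Int.natAbs_pos.mpr hh0)
    have hNabs : N = w.natAbs * h_.natAbs := by
      have h2 : ((N : Int)).natAbs = (w * h_).natAbs := by rw [hNeq]
      simpa [Int.natAbs_mul] using h2
    have hLle : Nat.lcm w.natAbs h_.natAbs ≤ N := by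
      rw [hNabs]
      exact Nat.le_of_dvd (by rw [← hNabs]; omega)
        (Nat.lcm_dvd (dvd_mul_right _ _) (dvd_mul_left _ _))
    simp only [pzl2, pzl2_alt, if_neg (not_le.2 hn)]
    rw [show h_ * w = (N : Int) from by rw [Int.mul_comm]; omega]
    have hLterm : PySem.Int.floordiv (|w| * |h_|) ((Int.gcd |w| |h_| : Nat) : Int)
        = ((Nat.lcm w.natAbs h_.natAbs : Nat) : Int) := by
      simp only [Int.abs_eq_natAbs]
      rw [show ((w.natAbs : Int)) * ((h_.natAbs : Int)) = ((w.natAbs * h_.natAbs : Nat) : Int) from by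
        push_cast; ring]
      rw [show Int.gcd ((w.natAbs : Nat) : Int) ((h_.natAbs : Nat) : Int)
            = Nat.gcd w.natAbs h_.natAbs from by simp [Int.gcd, Int.natAbs_abs]]
      rw [PySem.Int.floordiv_natCast]
      rw [Nat.lcm]
    rw [hLterm]
    obtain ⟨m, b, hfold, hb0, hbN, hfb, hmin, hstrict⟩ := Afold_char robots w h_ N hNpos
    rw [hfold, Bfold_inv robots w h_ (Nat.lcm w.natAbs h_.natAbs)]
    set vs := (List.range (Nat.lcm w.natAbs h_.natAbs)).map
      (fun (k : Nat) => pzl1A robots w h_ (k : Int)) with hvs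
    have hvs_ne : vs ≠ [] := by
      simp only [hvs, ne_eq, List.map_eq_nil_iff, List.range_eq_nil]
      omega
    rcases hmm : PySem.List.min? vs (fun x => x) with _ | m0
    · exact absurd ((PySem.List.min?_eq_none_iff vs _).1 hmm) hvs_ne
    · have hm0mem := PySem.List.min?_mem hmm
      have hm0min := PySem.List.min?_isMin hmm
      obtain ⟨k, hk, hkv⟩ := List.mem_map.1 hm0mem
      have hkN : k < Nat.lcm w.natAbs h_.natAbs := List.mem_range.1 hk
      have h1 : m ≤ m0 := by
        rw [← hkv]
        exact hmin (k : Int) (Int.natCast_nonneg k) (by exact_mod_cast lt_of_lt_of_le hkN hLle)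
      have h2 : m0 ≤ m := by
        have hper : pzl1A robots w h_ b
            = pzl1A robots w h_ ((b.toNat % Nat.lcm w.natAbs h_.natAbs : Nat) : Int) := by
          conv_lhs => rw [show b = ((b.toNat : Nat) : Int) from (Int.toNat_of_nonneg hb0).symm]
          exact pzl1A_mod_period robots w h_ b.toNat hLpos
        have hmem : pzl1A robots w h_ ((b.toNat % Nat.lcm w.natAbs h_.natAbs : Nat) : Int) ∈ vs :=
          List.mem_map.2 ⟨b.toNat % Nat.lcm w.natAbs h_.natAbs,
            List.mem_range.2 (Nat.mod_lt _ hLpos), rfl⟩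
        have h3 := hm0min _ hmem
        rw [← hper, hfb] at h3
        exact h3
      have hm : m0 = m := le_antisymm h2 h1
      have hmem0 : m0 ∈ vs := hm0mem
      rcases hidx : PySem.List.index? vs m0 with _ | b0
      · rw [PySem.List.index?_eq_none_iff] at hidx
        exact absurd hmem0 hidx
      · obtain ⟨hb0lt, hval, hfirst⟩ := PySem.List.getElem_of_index?_eq_some hidx
        have hlen : vs.length = Nat.lcm w.natAbs h_.natAbs := by simp [hvs]
        have hget : ∀ (j : Nat) (hj : j < vs.length), vs[j] = pzl1A robots w h_ (j : Int) := by
          intro j hj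
          simp [hvs]
        have hbb : ((b0 : Nat) : Int) = b := by
          rcases lt_trichotomy ((b0 : Nat) : Int) b with hlt | he | hgt
          · exfalso
            have hs := hstrict (b0 : Int) (Int.natCast_nonneg b0) hlt
            have : pzl1A robots w h_ (b0 : Int) = m := by
              rw [← hget b0 hb0lt] at *
              rw [hval, hm]
            omega
          · exact he
          · exfalso
            apply hfirst b.toNat (by omega)
            rw [hget b.toNat (by omega)]
            rw [Int.toNat_of_nonneg hb0, hfb, hm]
        have hidx2 : List.idxOf? m0 vs = some b0 := by simpa using hidx
        simp [hidx2, hbb]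

-- ===== VERDICT (by name: the statement is the Claim_ definition above) =====
theorem pzl2_spec : Claim_equal_pzl2 := by
  intro robots w h_ _
  unfold Spec_pzl2
  exact pzl2_eq robots w h_
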